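-- pv_equiv track=rewrite | github.com/DvidMakesThings/SW_PartsDB | services/barcode_service.py | _encode_code128
-- ===== SOURCE A (Python) =====
-- CODE128_START_B = 104
--
-- CODE128_STOP = 106
--
-- CODE128_PATTERNS = [
--     "11011001100", "11001101100", "11001100110", "10010011000", "10010001100",  # 0-4
--     "10001001100", "10011001000", "10011000100", "10001100100", "11001001000",  # 5-9
--     "11001000100", "11000100100", "10110011100", "10011011100", "10011001110",  # 10-14
--     "10111001100", "10011101100", "10011100110", "11001110010", "11001011100",  # 15-19
--     "11001001110", "11011100100", "11001110100", "11101101110", "11101001100",  # 20-24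
--     "11100101100", "11100100110", "11101100100", "11100110100", "11100110010",  # 25-29
--     "11011011000", "11011000110", "11000110110", "10100011000", "10001011000",  # 30-34
--     "10001000110", "10110001000", "10001101000", "10001100010", "11010001000",  # 35-39
--     "11000101000", "11000100010", "10110111000", "10110001110", "10001101110",  # 40-44
--     "10111011000", "10111000110", "10001110110", "11101110110", "11010001110",  # 45-49
--     "11000101110", "11011101000", "11011100010", "11011101110", "11101011000",  # 50-54
--     "11101000110", "11100010110", "11101101000", "11101100010", "11100011010",  # 55-59
--     "11101111010", "11001000010", "11110001010", "10100110000", "10100001100",  # 60-64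
--     "10010110000", "10010000110", "10000101100", "10000100110", "10110010000",  # 65-69
--     "10110000100", "10011010000", "10011000010", "10000110100", "10000110010",  # 70-74
--     "11000010010", "11001010000", "11110111010", "11000010100", "10001111010",  # 75-79
--     "10100111100", "10010111100", "10010011110", "10111100100", "10011110100",  # 80-84
--     "10011110010", "11110100100", "11110010100", "11110010010", "11011011110",  # 85-89
--     "11011110110", "11110110110", "10101111000", "10100011110", "10001011110",  # 90-94
--     "10111101000", "10111100010", "11110101000", "11110100010", "10111011110",  # 95-99
--     "10111101110", "11101011110", "11110101110", "11010000100", "11010010000",  # 100-104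
--     "11010011100", "1100011101011",  # 105 (START C), 106 (STOP)
-- ]
--
-- def _encode_code128(text: str) -> str:
--     """
--     Encode text as Code 128B barcode pattern.
--     Returns a string of 1s and 0s representing bars and spaces.
--     """
--     # Start with Code B
--     values = [CODE128_START_B]
--
--     # Encode each character
--     for char in text:
--         code = ord(char) - 32  # ASCII 32 = value 0 in Code 128B
--         if 0 <= code <= 95:
--             values.append(code)
--         else:
--             # Replace non-printable with space
--             values.append(0)
--
--     # Calculate checksum
--     checksum = values[0]
--     for i, val in enumerate(values[1:], 1):
--         checksum += i * val
--     checksum = checksum % 103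
--     values.append(checksum)
--
--     # Add stop code
--     values.append(CODE128_STOP)
--
--     # Convert to pattern
--     pattern = ""
--     for val in values:
--         pattern += CODE128_PATTERNS[val]
--
--     return pattern
-- ===== SOURCE B (Python) =====
-- CODE128_START_B = 104
--
-- CODE128_STOP = 106
--
-- CODE128_PATTERNS = [
--     "11011001100", "11001101100", "11001100110", "10010011000", "10010001100",  # 0-4
--     "10001001100", "10011001000", "10011000100", "10001100100", "11001001000",  # 5-9
--     "11001000100", "11000100100", "10110011100", "10011011100", "10011001110",  # 10-14
--     "10111001100", "10011101100", "10011100110", "11001110010", "11001011100",  # 15-19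
--     "11001001110", "11011100100", "11001110100", "11101101110", "11101001100",  # 20-24
--     "11100101100", "11100100110", "11101100100", "11100110100", "11100110010",  # 25-29
--     "11011011000", "11011000110", "11000110110", "10100011000", "10001011000",  # 30-34
--     "10001000110", "10110001000", "10001101000", "10001100010", "11010001000",  # 35-39
--     "11000101000", "11000100010", "10110111000", "10110001110", "10001101110",  # 40-44
--     "10111011000", "10111000110", "10001110110", "11101110110", "11010001110",  # 45-49
--     "11000101110", "11011101000", "11011100010", "11011101110", "11101011000",  # 50-54
--     "11101000110", "11100010110", "11101101000", "11101100010", "11100011010",  # 55-59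
--     "11101111010", "11001000010", "11110001010", "10100110000", "10100001100",  # 60-64
--     "10010110000", "10010000110", "10000101100", "10000100110", "10110010000",  # 65-69
--     "10110000100", "10011010000", "10011000010", "10000110100", "10000110010",  # 70-74
--     "11000010010", "11001010000", "11110111010", "11000010100", "10001111010",  # 75-79
--     "10100111100", "10010111100", "10010011110", "10111100100", "10011110100",  # 80-84
--     "10011110010", "11110100100", "11110010100", "11110010010", "11011011110",  # 85-89
--     "11011110110", "11110110110", "10101111000", "10100011110", "10001011110",  # 90-94
--     "10111101000", "10111100010", "11110101000", "11110100010", "10111011110",  # 95-99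
--     "10111101110", "11101011110", "11110101110", "11010000100", "11010010000",  # 100-104
--     "11010011100", "1100011101011",  # 105 (START C), 106 (STOP)
-- ]
--
-- def _encode_code128(text: str) -> str:
--     """Single reverse pass: multiplication-free checksum via nested suffix sums,
--     patterns collected back-to-front and joined once."""
--     s = 0  # sum of the codes of the suffix processed so far
--     t = 0  # sum over that suffix of (position within suffix) * code == weighted total
--     rev_parts = []
--     for char in reversed(text):
--         code = ord(char) - 32
--         if not (0 <= code <= 95):
--             code = 0
--         s += code
--         t += s
--         rev_parts.append(CODE128_PATTERNS[code])
--     rev_parts.append(CODE128_PATTERNS[CODE128_START_B])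
--     checksum = (CODE128_START_B + t) % 103
--     return ("".join(reversed(rev_parts))
--             + CODE128_PATTERNS[checksum] + CODE128_PATTERNS[CODE128_STOP])
-- ===== Notes on version B (the rewrite author's own statement) =====
-- stated objective: alternative
-- what changed: Replaced A's three sequential passes (build a values list, multiply-accumulate checksum over enumerate, concatenate patterns) by one reverse pass that computes the weighted checksum multiplication-free via nested suffix sums (s += code; t += s) while collecting the patterns back-to-front, joined once at the end.
import Mathlib
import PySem

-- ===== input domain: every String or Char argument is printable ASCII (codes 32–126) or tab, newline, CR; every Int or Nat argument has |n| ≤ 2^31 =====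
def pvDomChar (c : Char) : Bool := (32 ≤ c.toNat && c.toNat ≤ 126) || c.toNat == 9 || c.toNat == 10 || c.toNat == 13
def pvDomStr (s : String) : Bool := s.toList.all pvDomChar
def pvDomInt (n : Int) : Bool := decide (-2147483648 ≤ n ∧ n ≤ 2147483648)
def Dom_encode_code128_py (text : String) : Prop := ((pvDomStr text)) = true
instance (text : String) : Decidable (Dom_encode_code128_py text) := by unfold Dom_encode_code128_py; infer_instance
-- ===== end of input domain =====

-- B replaces A's three sequential passes by one reverse pass with a multiplication-free
-- checksum (nested suffix sums) and a body built back-to-front (objective: alternative).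

def pvPatterns : List String := [
  "11011001100", "11001101100", "11001100110", "10010011000", "10010001100",
  "10001001100", "10011001000", "10011000100", "10001100100", "11001001000",
  "11001000100", "11000100100", "10110011100", "10011011100", "10011001110",
  "10111001100", "10011101100", "10011100110", "11001110010", "11001011100",
  "11001001110", "11011100100", "11001110100", "11101101110", "11101001100",
  "11100101100", "11100100110", "11101100100", "11100110100", "11100110010",
  "11011011000", "11011000110", "11000110110", "10100011000", "10001011000",
  "10001000110", "10110001000", "10001101000", "10001100010", "11010001000",
  "11000101000", "11000100010", "10110111000", "10110001110", "10001101110",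
  "10111011000", "10111000110", "10001110110", "11101110110", "11010001110",
  "11000101110", "11011101000", "11011100010", "11011101110", "11101011000",
  "11101000110", "11100010110", "11101101000", "11101100010", "11100011010",
  "11101111010", "11001000010", "11110001010", "10100110000", "10100001100",
  "10010110000", "10010000110", "10000101100", "10000100110", "10110010000",
  "10110000100", "10011010000", "10011000010", "10000110100", "10000110010",
  "11000010010", "11001010000", "11110111010", "11000010100", "10001111010",
  "10100111100", "10010111100", "10010011110", "10111100100", "10011110100",
  "10011110010", "11110100100", "11110010100", "11110010010", "11011011110",
  "11011110110", "11110110110", "10101111000", "10100011110", "10001011110",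
  "10111101000", "10111100010", "11110101000", "11110100010", "10111011110",
  "10111101110", "11101011110", "11110101110", "11010000100", "11010010000",
  "11010011100", "1100011101011"
]

-- ===== PORT A =====
def encode_code128_py (text : String) : String :=
  -- values = [CODE128_START_B]; for char in text: append code (clamped to 0)
  let values : List Int :=
    text.toList.foldl (fun vs c =>
      let code : Int := (c.toNat : Int) - 32
      if 0 ≤ code ∧ code ≤ 95 then vs ++ [code] else vs ++ [0]) [104]
  -- checksum = values[0]; for i, val in enumerate(values[1:], 1): checksum += i * val
  let checksum : Int :=
    PySem.Int.mod
      ((values.drop 1).foldl (fun (st : Int × Int) v => (st.1 + 1, st.2 + st.1 * v))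
        (1, values.headD 0)).2 103
  let values := values ++ [checksum, 106]
  -- pattern = ""; for val in values: pattern += CODE128_PATTERNS[val]
  -- (the index is always in range, so pyGet?.getD "" is exact here)
  values.foldl (fun p v => p ++ (PySem.List.pyGet? pvPatterns v).getD "") ""

-- ===== PORT B =====
def encode_code128_py_alt (text : String) : String :=
  -- one reverse pass: s = suffix code sum, t += s (weighted total), patterns collected
  -- back-to-front and joined once
  let r := text.toList.reverse.foldl
    (fun (st : Int × Int × List String) ch =>
      let code : Int := (ch.toNat : Int) - 32
      let code := if 0 ≤ code ∧ code ≤ 95 then code else 0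
      (st.1 + code, st.2.1 + (st.1 + code), st.2.2 ++ [pvPatterns.getD code.toNat ""]))
    ((0 : Int), (0 : Int), ([] : List String))
  let revParts := r.2.2 ++ [pvPatterns.getD 104 ""]
  let checksum := PySem.Int.mod (104 + r.2.1) 103
  PySem.Str.join "" revParts.reverse
    ++ pvPatterns.getD checksum.toNat "" ++ pvPatterns.getD 106 ""

-- ===== PRECONDITION & SPEC =====
def Spec_encode_code128_py (text : String) (out : String) : Prop := out = encode_code128_py_alt text
instance (text : String) (out : String) : Decidable (Spec_encode_code128_py text out) := by unfold Spec_encode_code128_py; infer_instance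

-- ===== CLAIM (what is proved, stated in full; the proofs are below) =====
def Claim_equal_encode_code128_py : Prop := ∀ (text : String), Dom_encode_code128_py text → Spec_encode_code128_py text (encode_code128_py text)

-- ===== LEMMAS AND PROOFS =====

-- the clamped Code128B code of one character
def pvF (c : Char) : Int :=
  if 0 ≤ (c.toNat : Int) - 32 ∧ (c.toNat : Int) - 32 ≤ 95 then (c.toNat : Int) - 32 else 0

-- pattern of a (nonnegative) code value, as A and B both look it up
def pvPat (v : Int) : String := pvPatterns.getD v.toNat ""

-- A's weighted checksum sum: pvWI [v1,…,vk] i = i*v1 + (i+1)*v2 + …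
def pvWI : List Int → Int → Int
  | [], _ => 0
  | v :: t, i => i * v + pvWI t (i + 1)

-- B's nested-suffix-sum accumulator over the reversed code list
def pvTT : List Int → Int → Int
  | [], _ => 0
  | v :: t, s => (s + v) + pvTT t (s + v)


theorem pvF_nonneg (c : Char) : 0 ≤ pvF c := by
  unfold pvF; split_ifs with h
  · exact h.1
  · exact Int.le_refl 0

theorem pvValuesA (l : List Char) (init : List Int) :
    l.foldl (fun vs c =>
      let code : Int := (c.toNat : Int) - 32
      if 0 ≤ code ∧ code ≤ 95 then vs ++ [code] else vs ++ [0]) init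
    = init ++ l.map pvF := by
  induction l generalizing init with
  | nil => simp
  | cons c t ih =>
      simp only [List.foldl_cons, List.map_cons]
      rw [ih]
      unfold pvF
      split_ifs <;> simp

theorem pvChecksumA (vs : List Int) (i acc : Int) :
    (vs.foldl (fun (st : Int × Int) v => (st.1 + 1, st.2 + st.1 * v)) (i, acc)).2
    = acc + pvWI vs i := by
  induction vs generalizing i acc with
  | nil => simp [pvWI]
  | cons v t ih => simp only [List.foldl_cons, pvWI]; rw [ih]; ring

theorem pvWI_shift (vs : List Int) (i : Int) : pvWI vs (i + 1) = pvWI vs i + vs.sum := by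
  induction vs generalizing i with
  | nil => simp [pvWI]
  | cons v t ih => simp only [pvWI, List.sum_cons]; rw [ih]; ring

theorem pvTT_snoc (rs : List Int) (s v : Int) :
    pvTT (rs ++ [v]) s = pvTT rs s + s + rs.sum + v := by
  induction rs generalizing s with
  | nil => simp [pvTT]
  | cons w t ih => simp only [List.cons_append, pvTT, List.sum_cons]; rw [ih]; ring

theorem pvTT_rev (vs : List Int) : pvTT vs.reverse 0 = pvWI vs 1 := by
  induction vs with
  | nil => simp [pvTT, pvWI]
  | cons v t ih =>
      rw [List.reverse_cons, pvTT_snoc, ih]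
      simp only [pvWI]
      rw [show (1 : Int) + 1 = 1 + 1 from rfl, pvWI_shift]
      simp [List.sum_reverse]
      ring

theorem pvPatternA (vs : List Int) (s : String) (h : ∀ v ∈ vs, 0 ≤ v) :
    (vs.foldl (fun p v => p ++ (PySem.List.pyGet? pvPatterns v).getD "") s).toList
    = s.toList ++ (vs.map (fun v => (pvPat v).toList)).flatten := by
  induction vs generalizing s with
  | nil => simp
  | cons v t ih =>
      simp only [List.foldl_cons, List.map_cons, List.flatten_cons]
      rw [ih _ (fun w hw => h w (List.mem_cons_of_mem _ hw))]
      have hv : 0 ≤ v := h v (List.mem_cons_self)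
      rw [PySem.List.pyGet?_of_nonneg _ hv]
      simp [pvPat, List.getD, String.toList_append]

theorem pvJoinNil (ls : List (List Char)) : PySem.Chars.join [] ls = ls.flatten := by
  induction ls with
  | nil => simp [PySem.Chars.join_nil]
  | cons a rest ih =>
      cases rest with
      | nil => simp [PySem.Chars.join_singleton]
      | cons b r =>
          rw [PySem.Chars.join_cons_cons]
          simp only [List.flatten_cons] at ih ⊢
          rw [ih]; simp

theorem pvJoinFlatten (parts : List String) :
    (PySem.Str.join "" parts).toList = (parts.map String.toList).flatten := by
  simp only [PySem.Str.join, String.toList_empty, String.toList_ofList]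
  exact pvJoinNil _

theorem pvLoopB (r : List Char) (s t : Int) (b : List String) :
    (r.foldl
      (fun (st : Int × Int × List String) ch =>
        let code : Int := (ch.toNat : Int) - 32
        let code := if 0 ≤ code ∧ code ≤ 95 then code else 0
        (st.1 + code, st.2.1 + (st.1 + code), st.2.2 ++ [pvPatterns.getD code.toNat ""]))
      (s, t, b)).2.1 = t + pvTT (r.map pvF) s
    ∧
    (r.foldl
      (fun (st : Int × Int × List String) ch =>
        let code : Int := (ch.toNat : Int) - 32
        let code := if 0 ≤ code ∧ code ≤ 95 then code else 0
        (st.1 + code, st.2.1 + (st.1 + code), st.2.2 ++ [pvPatterns.getD code.toNat ""]))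
      (s, t, b)).2.2 = b ++ r.map (fun c => pvPat (pvF c)) := by
  induction r generalizing s t b with
  | nil => simp [pvTT]
  | cons c rest ih =>
      simp only [List.foldl_cons, List.map_cons, pvTT]
      have hcode : (if 0 ≤ (c.toNat : Int) - 32 ∧ (c.toNat : Int) - 32 ≤ 95
          then (c.toNat : Int) - 32 else 0) = pvF c := by unfold pvF; rfl
      simp only [hcode]
      refine ⟨?_, ?_⟩
      · rw [(ih (s + pvF c) (t + (s + pvF c)) _).1]; ring
      · rw [(ih (s + pvF c) (t + (s + pvF c)) _).2]
        simp [pvPat]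

-- ===== VERDICT (by name: the statement is the Claim_ definition above) =====
theorem encode_code128_py_spec : Claim_equal_encode_code128_py := by
  intro text _
  unfold Spec_encode_code128_py encode_code128_py encode_code128_py_alt
  rw [← String.toList_inj]
  obtain ⟨h1, h2⟩ := pvLoopB text.toList.reverse 0 0 []
  simp only [] at h1 h2
  simp only [List.map_reverse] at h1
  rw [pvTT_rev] at h1
  simp only [List.nil_append] at h2
  simp only [pvValuesA, List.singleton_append, List.headD_cons, List.drop_succ_cons,
    List.drop_zero, pvChecksumA]
  have hnn : ∀ v ∈ (104 :: text.toList.map pvF)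
      ++ [PySem.Int.mod (104 + pvWI (text.toList.map pvF) 1) 103, 106], (0:Int) ≤ v := by
    intro v hv
    simp only [List.mem_append, List.mem_cons, List.mem_map,
      List.not_mem_nil, or_false] at hv
    obtain (rfl | ⟨c, -, rfl⟩) | (rfl | rfl) := hv
    · omega
    · exact pvF_nonneg c
    · exact PySem.Int.mod_nonneg _ (by norm_num)
    · omega
  rw [pvPatternA _ _ hnn, h1]
  simp only [String.toList_append]
  rw [h2, pvJoinFlatten]
  simp [List.map_append, List.map_map, List.map_reverse, pvPat, Function.comp_def]
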